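-- pv_equiv track=rewrite | github.com/jouvev/dofus_tools | src/parser/class_parser.py | dectecte_func
-- ===== SOURCE A (Python) =====
-- def dectecte_func(res,fname):
--     dectectend = False
--     f=len(res.split("\n"))
--     d=0
--     for i,l in enumerate(res.split("\n")):
--         if(dectectend and "def" in l):
--             f = i
--             break
--         if(not dectectend and "def "+fname in l):
--             d = i
--             dectectend=True
--     return d,f
-- ===== SOURCE B (Python) =====
-- def dectecte_func(res, fname):
--     # Build an index table of all "def"-containing lines once; since "def "+fname
--     # contains "def", the start line is necessarily in this table, and the end line
--     # is simply the table entry following it.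
--     lines = res.split("\n")
--     n = len(lines)
--     defs = [(i, l) for i, l in enumerate(lines) if "def" in l]
--     for p, (i, l) in enumerate(defs):
--         if "def " + fname in l:
--             f = defs[p + 1][0] if p + 1 < len(defs) else n
--             return i, f
--     return 0, n
-- ===== Notes on version B (the rewrite author's own statement) =====
-- stated objective: alternative
-- what changed: Instead of A's single stateful scan with a dectectend flag and break, B first builds an index table of all lines containing 'def' (one filtering pass over enumerate), then finds the start line inside that table (correct since 'def '+fname contains 'def') and reads the end line directly off the next table entry, defaulting to (0, len(lines)) when the table holds no match.
import Mathlib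
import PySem

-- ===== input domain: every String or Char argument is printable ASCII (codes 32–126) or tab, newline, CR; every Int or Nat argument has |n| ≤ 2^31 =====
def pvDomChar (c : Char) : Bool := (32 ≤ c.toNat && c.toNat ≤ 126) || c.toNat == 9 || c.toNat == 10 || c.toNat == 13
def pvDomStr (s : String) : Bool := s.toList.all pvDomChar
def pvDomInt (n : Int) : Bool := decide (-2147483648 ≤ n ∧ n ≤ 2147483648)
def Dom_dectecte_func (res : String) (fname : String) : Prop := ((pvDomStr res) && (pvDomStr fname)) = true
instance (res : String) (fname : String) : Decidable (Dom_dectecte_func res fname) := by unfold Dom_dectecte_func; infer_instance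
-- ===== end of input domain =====

-- B replaces A's flag-and-break scan by an index table of the "def"-containing lines built once,
-- then looks the start line up in that table and reads the end line off the next table entry; same cost, alternative structure.

-- ===== PORT A =====
-- A's for-loop with the dectectend flag, break, and running index i.
def dectecteLoopA (fname : String) : List String → Nat → Bool → Int → Int → Int × Int
  | [], _, _, d, f => (d, f)
  | l :: ls, i, det, d, f =>
    if det = true then
      if PySem.Str.isIn "def" l then (d, (i : Int))
      else dectecteLoopA fname ls (i + 1) det d f
    else
      if PySem.Str.isIn ("def " ++ fname) l then dectecteLoopA fname ls (i + 1) true (i : Int) f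
      else dectecteLoopA fname ls (i + 1) det d f

def dectecte_func (res : String) (fname : String) : Int × Int :=
  let lines := (PySem.Str.split? res "\n").getD []
  dectecteLoopA fname lines 0 false 0 (lines.length : Int)

-- ===== PORT B =====
-- B's loop over the table `defs`: at each entry, if the line matches, the end line is the next
-- table entry's index (defs[p+1][0], i.e. the head of the remaining table) or n.
def dectecteLoopB (needle : String) (n : Int) : List (Int × String) → Int × Int
  | [] => (0, n)
  | (i, l) :: rest =>
    if PySem.Str.isIn needle l then
      (i, match rest with | [] => n | (j, _) :: _ => j)
    else dectecteLoopB needle n rest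

def dectecte_func_alt (res : String) (fname : String) : Int × Int :=
  let lines := (PySem.Str.split? res "\n").getD []
  let n : Int := (lines.length : Int)
  let defs := (PySem.List.enumerate lines 0).filter (fun il => PySem.Str.isIn "def" il.2)
  dectecteLoopB ("def " ++ fname) n defs

-- ===== PRECONDITION & SPEC =====
def Spec_dectecte_func (res : String) (fname : String) (out : Int × Int) : Prop := out = dectecte_func_alt res fname
instance (res : String) (fname : String) (out : Int × Int) : Decidable (Spec_dectecte_func res fname out) := by unfold Spec_dectecte_func; infer_instance

-- ===== CLAIM (what is proved, stated in full; the proofs are below) =====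
def Claim_equal_dectecte_func : Prop := ∀ (res : String) (fname : String), Dom_dectecte_func res fname → Spec_dectecte_func res fname (dectecte_func res fname)

-- ===== LEMMAS AND PROOFS =====

-- a line containing "def "+fname contains "def"
theorem isIn_def_of_isIn_needle (fname l : String)
    (h : PySem.Str.isIn ("def " ++ fname) l = true) : PySem.Str.isIn "def" l = true := by
  rw [PySem.Str.isIn_iff_infix] at h ⊢
  refine List.IsInfix.trans ?_ h
  refine (List.IsPrefix.isInfix ?_)
  refine ⟨' ' :: fname.toList, ?_⟩
  simp

-- the head index of the filtered enumeration is the first "def"-line's index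
theorem headB (n : Int) (ls : List String) : ∀ (i : Int),
    (match (PySem.List.enumerate ls i).filter (fun il => PySem.Str.isIn "def" il.2) with
     | [] => n | (j, _) :: _ => j) =
    (match List.findIdx? (fun l => PySem.Str.isIn "def" l) ls with
     | none => n | some j => i + (j : Int)) := by
  induction ls with
  | nil => intro i; rfl
  | cons l ls ih =>
    intro i
    rw [PySem.List.enumerate_cons, List.filter_cons, List.findIdx?_cons]
    cases h : PySem.Str.isIn "def" l with
    | true => simp
    | false =>
      simp only [Bool.false_eq_true, if_false, ih (i + 1)]
      cases hj : List.findIdx? (fun l => PySem.Str.isIn "def" l) ls with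
      | none => simp
      | some j => simp; push_cast; ring

-- B's loop over the filtered enumeration = find the start line, then the next "def" line after it
theorem dectecteLoopB_filter (fname : String) (n : Int) (ls : List String) : ∀ (i : Int),
    dectecteLoopB ("def " ++ fname) n
      ((PySem.List.enumerate ls i).filter (fun il => PySem.Str.isIn "def" il.2)) =
    (match List.findIdx? (fun l => PySem.Str.isIn ("def " ++ fname) l) ls with
     | none => (0, n)
     | some k =>
       ((i + (k : Int)),
        match List.findIdx? (fun l => PySem.Str.isIn "def" l) (ls.drop (k + 1)) with
        | none => n | some j => i + (k : Int) + 1 + (j : Int))) := by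
  induction ls with
  | nil => intro i; rfl
  | cons l ls ih =>
    intro i
    rw [PySem.List.enumerate_cons, List.filter_cons, List.findIdx?_cons]
    cases hd : PySem.Str.isIn "def" l with
    | false =>
      have hn : PySem.Str.isIn ("def " ++ fname) l = false := by
        cases hn : PySem.Str.isIn ("def " ++ fname) l with
        | false => rfl
        | true => rw [isIn_def_of_isIn_needle fname l hn] at hd; exact hd
      simp only [hd, hn, Bool.false_eq_true, if_false, ih (i + 1)]
      cases hk : List.findIdx? (fun l => PySem.Str.isIn ("def " ++ fname) l) ls with
      | none => simp
      | some k =>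
        simp only [Option.map_some, List.drop_succ_cons]
        cases hj : List.findIdx? (fun l => PySem.Str.isIn "def" l) (ls.drop (k + 1)) with
        | none => simp <;> omega
        | some j => simp <;> omega
    | true =>
      simp only [hd, if_true]
      cases hn : PySem.Str.isIn ("def " ++ fname) l with
      | true =>
        simp only [dectecteLoopB, hn, if_true, List.drop_succ_cons, List.drop_zero, headB n ls (i + 1)]
        cases hj : List.findIdx? (fun l => PySem.Str.isIn "def" l) ls with
        | none => simp <;> omega
        | some j => simp <;> omega
      | false =>
        simp only [dectecteLoopB, hn, Bool.false_eq_true, if_false, ih (i + 1)]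
        cases hk : List.findIdx? (fun l => PySem.Str.isIn ("def " ++ fname) l) ls with
        | none => simp
        | some k =>
          simp only [Option.map_some, List.drop_succ_cons]
          cases hj : List.findIdx? (fun l => PySem.Str.isIn "def" l) (ls.drop (k + 1)) with
          | none => simp <;> omega
          | some j => simp <;> omega

-- After detection, A's loop returns d paired with the index of the first later "def" line (or f).
theorem dectecteLoopA_true (fname : String) (ls : List String) (i : Nat) (d f : Int) :
    dectecteLoopA fname ls i true d f =
      (d, match List.findIdx? (fun l => PySem.Str.isIn "def" l) ls with
          | none => f
          | some j => ((i + j : Nat) : Int)) := by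
  induction ls generalizing i with
  | nil => rfl
  | cons l ls ih =>
    simp only [List.findIdx?_cons]
    cases h : PySem.Str.isIn "def" l with
    | true =>
      simp only [dectecteLoopA, h, if_true, eq_self_iff_true, Nat.add_zero]
    | false =>
      simp only [dectecteLoopA, h, Bool.false_eq_true, if_false, if_true, eq_self_iff_true, ih (i + 1)]
      cases hj : List.findIdx? (fun l => PySem.Str.isIn "def" l) ls with
      | none => simp only [hj, Option.map_none]
      | some j =>
        simp only [hj, Option.map_some]
        refine congrArg (Prod.mk d) ?_
        push_cast; ring

-- Before detection, A's loop is: find the start line, then the next "def" line after it.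
theorem dectecteLoopA_false (fname : String) (ls : List String) (i : Nat) (d f : Int) :
    dectecteLoopA fname ls i false d f =
      (match List.findIdx? (fun l => PySem.Str.isIn ("def " ++ fname) l) ls with
       | none => (d, f)
       | some k =>
         (((i + k : Nat) : Int),
          match List.findIdx? (fun l => PySem.Str.isIn "def" l) (ls.drop (k + 1)) with
          | none => f
          | some j => ((i + k + 1 + j : Nat) : Int))) := by
  induction ls generalizing i with
  | nil => rfl
  | cons l ls ih =>
    simp only [List.findIdx?_cons]
    cases h : PySem.Str.isIn ("def " ++ fname) l with
    | true =>
      simp only [dectecteLoopA, h, if_true, eq_self_iff_true, Bool.false_eq_true, if_false,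
        dectecteLoopA_true fname ls (i + 1) (i : Int) f, List.drop_succ_cons, List.drop_zero]
      cases hj : List.findIdx? (fun l => PySem.Str.isIn "def" l) ls with
      | none => simp only [hj]; rfl
      | some j =>
        simp only [hj]
        refine congrArg₂ Prod.mk (by push_cast; ring) (by push_cast; ring)
    | false =>
      simp only [dectecteLoopA, h, Bool.false_eq_true, if_false, if_true, eq_self_iff_true, ih (i + 1)]
      cases hk : List.findIdx? (fun l => PySem.Str.isIn ("def " ++ fname) l) ls with
      | none => simp only [hk, Option.map_none]
      | some k =>
        simp only [hk, Option.map_some, List.drop_succ_cons]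
        cases hj : List.findIdx? (fun l => PySem.Str.isIn "def" l) (ls.drop (k + 1)) with
        | none =>
          simp only [hj]
          refine congrArg₂ Prod.mk (by push_cast; ring) rfl
        | some j =>
          simp only [hj]
          refine congrArg₂ Prod.mk (by push_cast; ring) (by push_cast; ring)

-- ===== VERDICT (by name: the statement is the Claim_ definition above) =====
theorem dectecte_func_spec : Claim_equal_dectecte_func := by
  intro res fname _
  unfold Spec_dectecte_func dectecte_func dectecte_func_alt
  rw [dectecteLoopA_false, dectecteLoopB_filter]
  cases hk : List.findIdx? (fun l => PySem.Str.isIn ("def " ++ fname) l)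
      ((PySem.Str.split? res "\n").getD []) with
  | none => rfl
  | some k =>
    simp only
    cases hj : List.findIdx? (fun l => PySem.Str.isIn "def" l)
        (((PySem.Str.split? res "\n").getD []).drop (k + 1)) with
    | none => simp <;> omega
    | some j => simp <;> omega
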